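-- pv_equiv track=rewrite | github.com/TypeError92/nc-final-project-data | controllers/utils.py | is_good_anagram
-- ===== SOURCE A (Python) =====
-- def is_anagram(pair: tuple[str, str]):
--     s1, s2 = pair
--     letters1 = sorted(list(s1.replace(' ', '').upper()))
--     letters2 = sorted(list(s2.replace(' ', '').upper()))
--     return letters1 == letters2
--
-- def is_good_anagram(pair: tuple[str, str]):
--     if not is_anagram(pair):
--         return False
--     s1, s2 = pair
--     common_words = set(s1.split(' ')) & set(s2.split(' '))
--     for common_word in common_words:
--         if common_word not in ['A', 'I', 'THE']:
--             return False
--     return True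
-- ===== SOURCE B (Python) =====
-- def is_good_anagram(pair):
--     s1, s2 = pair
--     counts = {}
--     for c in s1.replace(' ', '').upper():
--         counts[c] = counts.get(c, 0) + 1
--     for c in s2.replace(' ', '').upper():
--         counts[c] = counts.get(c, 0) - 1
--     if any(v != 0 for v in counts.values()):
--         return False
--     words2 = set(s2.split(' '))
--     return all(w in ('A', 'I', 'THE') for w in s1.split(' ') if w in words2)
-- ===== Notes on version B (the rewrite author's own statement) =====
-- stated objective: faster
-- what changed: B replaces A's sort-both-cleaned-strings-and-compare anagram test by a single character-frequency dictionary (incremented over s1, decremented over s2, then checked all-zero), and replaces A's intersection-set filter loop by scanning s1's words and checking each word that also occurs in s2 against the allowlist.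
import Mathlib
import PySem

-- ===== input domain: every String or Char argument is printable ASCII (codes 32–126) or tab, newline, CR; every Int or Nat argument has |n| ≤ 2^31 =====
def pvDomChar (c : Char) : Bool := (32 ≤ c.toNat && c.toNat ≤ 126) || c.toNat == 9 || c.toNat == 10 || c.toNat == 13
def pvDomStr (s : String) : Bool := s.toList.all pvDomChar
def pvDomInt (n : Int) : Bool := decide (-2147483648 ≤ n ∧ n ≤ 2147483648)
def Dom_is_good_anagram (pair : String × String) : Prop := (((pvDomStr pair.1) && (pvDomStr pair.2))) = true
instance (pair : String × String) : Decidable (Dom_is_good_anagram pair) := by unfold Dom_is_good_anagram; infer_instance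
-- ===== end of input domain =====

-- B replaces A's sort-and-compare anagram test by one +1/-1 character-frequency dictionary checked
-- for all-zero values (O(n) vs O(n log n)), and A's intersection-set filter loop by a scan over
-- s1's words (objective: faster, measured).

-- ===== PORT A =====
def pv_is_anagram (pair : String × String) : Bool :=
  let letters1 := PySem.List.sorted (PySem.Str.upper (PySem.Str.replace pair.1 " " "")).toList (fun x => x) false
  let letters2 := PySem.List.sorted (PySem.Str.upper (PySem.Str.replace pair.2 " " "")).toList (fun x => x) false
  letters1 == letters2

def is_good_anagram (pair : String × String) : Bool :=
  if !(pv_is_anagram pair) then false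
  else
    let common_words := PySem.Set.inter (PySem.Set.ofList ((PySem.Str.split? pair.1 " ").getD []))
                                        (PySem.Set.ofList ((PySem.Str.split? pair.2 " ").getD []))
    -- 'for w in common_words: if w not in [...]: return False / return True' (order-independent)
    common_words.all (fun w => ["A", "I", "THE"].contains w)

-- ===== PORT B =====
def is_good_anagram_alt (pair : String × String) : Bool :=
  -- counts[c] = counts.get(c, 0) + 1 over s1, then counts[c] = counts.get(c, 0) - 1 over s2
  let counts1 := (PySem.Str.upper (PySem.Str.replace pair.1 " " "")).toList.foldl
      (fun d c => d.modify c 0 (fun v => v + 1)) (PySem.Dict.empty : PySem.Dict Char Int)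
  let counts := (PySem.Str.upper (PySem.Str.replace pair.2 " " "")).toList.foldl
      (fun d c => d.modify c 0 (fun v => v - 1)) counts1
  if counts.values.any (fun v => v != 0) then false
  else
    -- all(w in ('A','I','THE') for w in s1.split(' ') if w in words2)
    let words2 := PySem.Set.ofList ((PySem.Str.split? pair.2 " ").getD [])
    (((PySem.Str.split? pair.1 " ").getD []).filter (fun w => words2.contains w)).all
      (fun w => ["A", "I", "THE"].contains w)

-- ===== PRECONDITION & SPEC =====
def Spec_is_good_anagram (pair : String × String) (out : Bool) : Prop := out = is_good_anagram_alt pair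
instance (pair : String × String) (out : Bool) : Decidable (Spec_is_good_anagram pair out) := by unfold Spec_is_good_anagram; infer_instance

-- ===== CLAIM (what is proved, stated in full; the proofs are below) =====
def Claim_equal_is_good_anagram : Prop := ∀ (pair : String × String), Dom_is_good_anagram pair → Spec_is_good_anagram pair (is_good_anagram pair)

-- ===== LEMMAS AND PROOFS =====

-- The decrement loop subtracts each element's count from the stored frequency.
theorem pv_getD_foldl_modify_sub_one (l : List Char) (d : PySem.Dict Char Int) (v : Char) :
    (l.foldl (fun d c => d.modify c 0 (fun v => v - 1)) d).getD v 0 = d.getD v 0 - l.count v := by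
  induction l generalizing d with
  | nil => simp
  | cons x rest ih =>
    simp only [List.foldl_cons, ih, PySem.Dict.getD_modify, List.count_cons, beq_iff_eq]
    by_cases h : v = x
    · subst h; rw [if_pos rfl, if_pos rfl]; push_cast; omega
    · rw [if_neg h, if_neg (fun hx => h (Eq.symm hx))]; push_cast; omega

-- get? is none off the stored keys.
theorem pv_get?_eq_none (ps : List (Char × Int)) (k : Char) (h : k ∉ ps.map Prod.fst) :
    (PySem.Dict.mk ps).get? k = none := by
  induction ps with
  | nil => rfl
  | cons p rest ih =>
    obtain ⟨k0, v0⟩ := p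
    simp only [List.map_cons, List.mem_cons, not_or] at h
    rw [PySem.Dict.get?_mk_cons]
    simp only [beq_iff_eq]
    rw [if_neg (by exact fun hk => h.1 hk.symm)]
    exact ih h.2

-- For a dict with distinct keys, all stored values are 0 iff every lookup (default 0) is 0.
theorem pv_values_zero_iff (ps : List (Char × Int)) (h : (ps.map Prod.fst).Nodup) :
    (∀ p ∈ ps, p.2 = 0) ↔ ∀ k, (PySem.Dict.mk ps).getD k 0 = 0 := by
  induction ps with
  | nil => simp [PySem.Dict.getD, PySem.Dict.get?]
  | cons p rest ih =>
    obtain ⟨k0, v0⟩ := p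
    simp only [List.map_cons, List.nodup_cons] at h
    constructor
    · intro hall k
      simp only [PySem.Dict.getD, PySem.Dict.get?_mk_cons, beq_iff_eq]
      split_ifs with hk
      · simpa using hall (k0, v0) (by simp)
      · exact (ih h.2).1 (fun q hq => hall q (by simp [hq])) k
    · intro hall q hq
      rcases List.mem_cons.1 hq with rfl | hq'
      · have := hall k0
        simpa [PySem.Dict.getD, PySem.Dict.get?_mk_cons] using this
      · refine (ih h.2).2 (fun k => ?_) q hq'
        by_cases hk : k = k0
        · subst hk
          have : k ∉ rest.map Prod.fst := h.1
          simp [PySem.Dict.getD, pv_get?_eq_none rest k this]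
        · have := hall k
          simp only [PySem.Dict.getD, PySem.Dict.get?_mk_cons] at this ⊢
          rwa [if_neg (by simp [Ne.symm hk])] at this

-- B's all-values-zero test decides permutation of the two cleaned character lists.
theorem pv_counts_test (l1 l2 : List Char) :
    (((l2.foldl (fun d c => d.modify c 0 (fun v => v - 1))
        (l1.foldl (fun d c => d.modify c 0 (fun v => v + 1)) (PySem.Dict.empty : PySem.Dict Char Int))).values.any
          (fun v => v != 0)) = false) ↔ l1.Perm l2 := by
  set d := l2.foldl (fun d c => d.modify c 0 (fun v => v - 1))
      (l1.foldl (fun d c => d.modify c 0 (fun v => v + 1)) (PySem.Dict.empty : PySem.Dict Char Int)) with hd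
  have hnodup : d.keys.Nodup := by
    rw [hd]
    exact PySem.Dict.nodup_keys_foldl_modify_key l2 (fun x => x) 0 (fun _ _ v => v - 1) _
      (PySem.Dict.nodup_keys_foldl_modify_key l1 (fun x => x) 0 (fun _ _ v => v + 1)
        PySem.Dict.empty List.nodup_nil)
  have hgetD : ∀ v, d.getD v 0 = (l1.count v : Int) - l2.count v := by
    intro v
    rw [hd, pv_getD_foldl_modify_sub_one, PySem.Dict.getD_foldl_modify_add_one]
    simp [PySem.Dict.getD, PySem.Dict.get?, PySem.Dict.empty]
  have hkeys : d.keys = d.items.map Prod.fst := rfl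
  have hvals : d.values = d.items.map Prod.snd := rfl
  have h1 : ((d.values.any (fun v => v != 0)) = false) ↔ ∀ p ∈ d.items, p.2 = 0 := by
    rw [hvals]
    simp [List.any_eq_false]
  rw [h1, pv_values_zero_iff d.items (by rw [← hkeys]; exact hnodup)]
  have hd' : PySem.Dict.mk d.items = d := rfl
  rw [hd']
  constructor
  · intro h
    rw [List.perm_iff_count]
    intro a
    have := h a
    rw [hgetD a] at this
    omega
  · intro h k
    rw [hgetD k, (List.perm_iff_count.1 h) k]
    omega

-- A's sorted-equal test also decides permutation.
theorem pv_anagram_iff (l1 l2 : List Char) :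
    ((PySem.List.sorted l1 (fun x => x) false == PySem.List.sorted l2 (fun x => x) false) = true)
      ↔ l1.Perm l2 := by
  rw [beq_iff_eq]
  exact PySem.List.sorted_id_eq_sorted_id_iff_perm l1 l2

-- A's loop over the common-words set and B's filtered scan over s1's words agree.
theorem pv_filter_eq (w1 w2 : List String) :
    ((PySem.Set.inter (PySem.Set.ofList w1) (PySem.Set.ofList w2)).all
        (fun w => ["A", "I", "THE"].contains w))
      = ((w1.filter (fun w => (PySem.Set.ofList w2).contains w)).all
        (fun w => ["A", "I", "THE"].contains w)) := by
  rw [Bool.eq_iff_iff, List.all_eq_true, List.all_eq_true]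
  constructor
  · intro h w hw
    rw [List.mem_filter] at hw
    refine h w ?_
    rw [show (PySem.Set.inter (PySem.Set.ofList w1) (PySem.Set.ofList w2) : List String)
          = PySem.Set.inter (PySem.Set.ofList w1) (PySem.Set.ofList w2) from rfl]
    rw [PySem.Set.mem_inter]
    exact ⟨(PySem.Set.mem_ofList w1 w).2 hw.1, (PySem.Set.contains_iff _ _).1 hw.2⟩
  · intro h w hw
    rw [PySem.Set.mem_inter] at hw
    refine h w ?_
    rw [List.mem_filter]
    exact ⟨(PySem.Set.mem_ofList w1 w).1 hw.1, (PySem.Set.contains_iff _ _).2 hw.2⟩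

-- The whole body of A equals the whole body of B, for any cleaned letter lists and word lists.
theorem pv_main (l1 l2 : List Char) (w1 w2 : List String) :
    (if !(PySem.List.sorted l1 (fun x => x) false == PySem.List.sorted l2 (fun x => x) false)
       then false
       else (PySem.Set.inter (PySem.Set.ofList w1) (PySem.Set.ofList w2)).all
              (fun w => ["A", "I", "THE"].contains w))
    = (if ((l2.foldl (fun d c => d.modify c 0 (fun v => v - 1))
              (l1.foldl (fun d c => d.modify c 0 (fun v => v + 1)) (PySem.Dict.empty : PySem.Dict Char Int))).values.any
                (fun v => v != 0))
         then false
         else ((w1.filter (fun w => (PySem.Set.ofList w2).contains w)).all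
                (fun w => ["A", "I", "THE"].contains w))) := by
  rw [pv_filter_eq]
  have hA := pv_anagram_iff l1 l2
  have hB := pv_counts_test l1 l2
  by_cases hp : l1.Perm l2
  · rw [hA.2 hp, hB.2 hp]
    simp
  · have h1 : (PySem.List.sorted l1 (fun x => x) false == PySem.List.sorted l2 (fun x => x) false)
        = false := Bool.eq_false_iff.2 (fun h => hp (hA.1 h))
    have h2 : ((l2.foldl (fun d c => d.modify c 0 (fun v => v - 1))
        (l1.foldl (fun d c => d.modify c 0 (fun v => v + 1)) (PySem.Dict.empty : PySem.Dict Char Int))).values.any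
          (fun v => v != 0)) = true := Bool.ne_false_iff.1 (fun h => hp (hB.1 h))
    rw [h1, h2]
    simp

-- ===== VERDICT (by name: the statement is the Claim_ definition above) =====
theorem is_good_anagram_spec : Claim_equal_is_good_anagram := by
  intro pair _
  unfold Spec_is_good_anagram is_good_anagram is_good_anagram_alt pv_is_anagram
  exact (pv_main (PySem.Str.upper (PySem.Str.replace pair.1 " " "")).toList
    (PySem.Str.upper (PySem.Str.replace pair.2 " " "")).toList
    ((PySem.Str.split? pair.1 " ").getD []) ((PySem.Str.split? pair.2 " ").getD []))
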